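-- pv_equiv track=rewrite | github.com/HoiskolensChemikerforening/hc-backend | chemie/customprofile/models.py | rfid_to_em
-- ===== SOURCE A (Python) =====
-- def rfid_to_em(code):
--     # Convert to binary and strip the "0b" prefix
--     binary = bin(int(code))[2:]
--
--     # Pad with zeroes on left side
--     padded = "0" * (8 - len(binary) % 8) + binary
--
--     # Split into 8-bit groups
--     chunked = [
--         padded[(i * 8) : (i + 1) * 8] for i in range(0, len(padded) // 8)
--     ]
--
--     # Reverse all elements in each group, join groups together
--     reversed = "".join([ci[::-1] for ci in chunked])
--
--     # Convert binary back to int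
--     return int(reversed, 2)
-- ===== SOURCE B (Python) =====
-- def rfid_to_em(code):
--     value = int(code)
--     result = 0
--     shift = 0
--     while value > 0:
--         byte = value & 0xFF
--         rev = 0
--         for _ in range(8):
--             rev = (rev << 1) | (byte & 1)
--             byte >>= 1
--         result |= rev << shift
--         value >>= 8
--         shift += 8
--     return result
-- ===== Notes on version B (the rewrite author's own statement) =====
-- stated objective: alternative
-- what changed: Replaces A's binary-string pipeline (bin, left zero-padding, byte-wide chunking, per-chunk string reversal, int re-parse in base two) with a purely arithmetic loop that reverses the bits of each byte with shifts and masks and ORs them into an integer accumulator.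
import Mathlib
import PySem

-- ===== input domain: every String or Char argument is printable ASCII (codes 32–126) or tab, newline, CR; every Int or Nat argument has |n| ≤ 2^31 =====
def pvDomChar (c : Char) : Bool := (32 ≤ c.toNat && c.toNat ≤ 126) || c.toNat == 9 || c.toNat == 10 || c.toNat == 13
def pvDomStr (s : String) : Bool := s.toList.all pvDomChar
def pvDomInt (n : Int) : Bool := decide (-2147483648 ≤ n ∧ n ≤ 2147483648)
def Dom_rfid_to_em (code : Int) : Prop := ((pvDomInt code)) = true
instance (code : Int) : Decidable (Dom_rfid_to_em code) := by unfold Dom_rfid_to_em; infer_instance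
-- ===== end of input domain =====

-- B reverses the bits of each byte with integer bit operations (per-byte shift/mask loop), instead of
-- A's binary-string build / pad / chunk / reverse / re-parse pipeline (objective: alternative; no strings).

-- ===== PORT A =====
-- bin(n)[2:] for n > 0: most-significant-first binary digits, no leading zeros
-- (structural recursion on a fuel argument ≥ n; the fuel is only a totality guard)
def pyBinAux : Nat → Nat → List Char
  | _, 0 => []
  | 0, _ + 1 => []
  | f + 1, n + 1 => pyBinAux f ((n + 1) / 2) ++ [if (n + 1) % 2 = 1 then '1' else '0']

def pyBinDigits (n : Nat) : List Char := pyBinAux n n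

-- int(s, 2) on a nonempty string of '0'/'1' characters
def parse2 (l : List Char) : Nat :=
  l.foldl (fun a c => 2 * a + (if c = '1' then 1 else 0)) 0

-- binary = bin(int(code))[2:]   (bin(0) gives "0"; negative code makes int(·, 2) raise, outside Pre_)
def binaryOf (n : Nat) : List Char := if n = 0 then ['0'] else pyBinDigits n
-- padded = "0" * (8 - len(binary) % 8) + binary
def paddedOf (n : Nat) : List Char :=
  List.replicate (8 - (binaryOf n).length % 8) '0' ++ binaryOf n
-- chunked = [padded[i*8 : (i+1)*8] for i in range(0, len(padded)//8)]
def chunkedOf (n : Nat) : List (List Char) :=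
  (List.range ((paddedOf n).length / 8)).map
    (fun i => PySem.List.slice (paddedOf n) (some ((i * 8 : Nat) : Int)) (some (((i + 1) * 8 : Nat) : Int)))
-- reversed = "".join([ci[::-1] for ci in chunked])   (ci[::-1] = reverse, PySem.List.slice?_none_none_neg_one)
def reversedOf (n : Nat) : List Char := ((chunkedOf n).map (fun ci => ci.reverse)).flatten

-- strings are represented as List Char (exact: only slicing/len/join/int-parse are used);
-- int(code) is the identity on an int argument, code.toNat is exact on Pre_ (0 ≤ code)
def rfid_to_em (code : Int) : Int := (parse2 (reversedOf code.toNat) : Int)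

-- ===== PORT B =====
-- the inner 'for _ in range(8): rev = (rev << 1) | (byte & 1); byte >>= 1'
def revByte : Nat → Nat → Nat → Nat
  | 0, _, rev => rev
  | k + 1, byte, rev => revByte k (byte >>> 1) ((rev <<< 1) ||| (byte &&& 1))

-- the outer 'while value > 0' loop over (value, result, shift)
-- (structural recursion on a fuel argument ≥ value; the fuel is only a totality guard)
def bLoop : Nat → Nat → Nat → Nat → Nat
  | _, 0, result, _ => result
  | 0, _ + 1, result, _ => result
  | f + 1, v + 1, result, shift =>
      bLoop f ((v + 1) >>> 8) (result ||| (revByte 8 ((v + 1) &&& 255) 0) <<< shift) (shift + 8)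

-- value = int(code); the loop body only runs while value > 0, so looping over code.toNat is exact
def rfid_to_em_alt (code : Int) : Int := (bLoop code.toNat code.toNat 0 0 : Int)

-- ===== PRECONDITION & SPEC =====
-- Pre_ excludes exactly the negative codes: there bin() produces a '-' sign, so A's int(·, 2) raises ValueError.
def Pre_rfid_to_em (code : Int) : Prop := 0 ≤ code
instance (code : Int) : Decidable (Pre_rfid_to_em code) := by unfold Pre_rfid_to_em; infer_instance
def pvWitness_rfid_to_em : Int := (1000)

def Spec_rfid_to_em (code : Int) (out : Int) : Prop := out = rfid_to_em_alt code
instance (code : Int) (out : Int) : Decidable (Spec_rfid_to_em code out) := by unfold Spec_rfid_to_em; infer_instance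

-- ===== CLAIM (what is proved, stated in full; the proofs are below) =====
def Claim_equal_rfid_to_em : Prop :=
  ∀ (code : Int), Dom_rfid_to_em code → Pre_rfid_to_em code → Spec_rfid_to_em code (rfid_to_em code)

-- ===== LEMMAS AND PROOFS =====

-- the common byte-recursive description both ports are reduced to (fuel ≥ n)
def gSpecAux : Nat → Nat → Nat
  | _, 0 => 0
  | 0, _ + 1 => 0
  | f + 1, n + 1 => revByte 8 ((n + 1) % 256) 0 + 256 * gSpecAux f ((n + 1) / 256)

def gSpec (n : Nat) : Nat := gSpecAux n n

lemma gSpecAux_fuel : ∀ f f' n : Nat, n ≤ f → n ≤ f' → gSpecAux f n = gSpecAux f' n := by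
  intro f
  induction f with
  | zero => intro f' n hf _; interval_cases n; cases f' <;> rfl
  | succ f ih =>
    intro f' n hf hf'
    match n, f' with
    | 0, f' => cases f' <;> rfl
    | n + 1, f' + 1 =>
      show revByte 8 ((n + 1) % 256) 0 + 256 * gSpecAux f ((n + 1) / 256)
         = revByte 8 ((n + 1) % 256) 0 + 256 * gSpecAux f' ((n + 1) / 256)
      rw [ih f' ((n + 1) / 256) (by omega) (by omega)]

lemma gSpec_def (n : Nat) (h : n ≠ 0) :
    gSpec n = revByte 8 (n % 256) 0 + 256 * gSpec (n / 256) := by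
  obtain ⟨m, rfl⟩ : ∃ m, n = m + 1 := ⟨n - 1, by omega⟩
  show revByte 8 ((m + 1) % 256) 0 + 256 * gSpecAux m ((m + 1) / 256) = _
  rw [gSpecAux_fuel m ((m + 1) / 256) ((m + 1) / 256) (by omega) (le_refl _)]
  rfl

set_option maxRecDepth 10000 in
lemma revByte_le (b : Nat) (hb : b < 256) : revByte 8 b 0 ≤ 255 := by
  revert hb; revert b; decide

lemma lor_eq_add (a b k : Nat) (h : a < 2 ^ k) : a ||| b * 2 ^ k = a + b * 2 ^ k := by
  apply Nat.eq_of_testBit_eq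
  intro i
  rw [Nat.testBit_or]
  have hadd : a + b * 2 ^ k = 2 ^ k * b + a := by ring
  have hmul : b * 2 ^ k = 2 ^ k * b + 0 := by ring
  rw [hadd, Nat.testBit_two_pow_mul_add b h i, hmul,
      Nat.testBit_two_pow_mul_add b (by positivity) i]
  by_cases hi : i < k
  · simp [hi, Nat.zero_testBit]
  · have : a.testBit i = false :=
      Nat.testBit_lt_two_pow (lt_of_lt_of_le h (Nat.pow_le_pow_right (by norm_num) (by omega)))
    simp [hi, this]

lemma and255 (v : Nat) : v &&& 255 = v % 256 :=
  Nat.and_two_pow_sub_one_eq_mod v 8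

-- B's loop invariant
lemma bLoop_eq (v : Nat) : ∀ f r s : Nat, v ≤ f → r < 2 ^ s →
    bLoop f v r s = r + 2 ^ s * gSpec v := by
  induction v using Nat.strong_induction_on with
  | _ v ih =>
    intro f r s hf hr
    match v, f with
    | 0, f => cases f <;> simp [bLoop, gSpec, gSpecAux]
    | w + 1, f + 1 =>
      have hv : w + 1 ≠ 0 := by omega
      have hR : revByte 8 ((w + 1) &&& 255) 0 ≤ 255 := by
        rw [and255]; exact revByte_le _ (Nat.mod_lt _ (by norm_num))
      have hsh : (w + 1) >>> 8 = (w + 1) / 256 := by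
        simp [Nat.shiftRight_eq_div_pow]
      have hlt : (w + 1) / 256 < w + 1 := Nat.div_lt_self (by omega) (by norm_num)
      show bLoop f ((w + 1) >>> 8) (r ||| (revByte 8 ((w + 1) &&& 255) 0) <<< s) (s + 8) = _
      rw [Nat.shiftLeft_eq, lor_eq_add _ _ _ hr, hsh]
      rw [ih ((w + 1) / 256) hlt f _ (s + 8) (by omega)
        (by
          have : (2:Nat) ^ (s + 8) = 2 ^ s * 256 := by rw [pow_add]; norm_num
          nlinarith [hr, hR, pow_pos (show (0:Nat) < 2 by norm_num) s])]
      rw [gSpec_def (w + 1) hv, and255]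
      have hp : (2:Nat) ^ (s + 8) = 2 ^ s * 256 := by rw [pow_add]; norm_num
      rw [hp]; ring

lemma alt_eq_gSpec (n : Nat) : bLoop n n 0 0 = gSpec n := by
  have := bLoop_eq n n 0 0 (le_refl n) (by norm_num)
  simpa using this

-- ---- A side ----

-- the low byte of pyBinDigits n, most significant bit first
def byteOf (n : Nat) : List Char :=
  [if n / 128 % 2 = 1 then '1' else '0', if n / 64 % 2 = 1 then '1' else '0',
   if n / 32 % 2 = 1 then '1' else '0', if n / 16 % 2 = 1 then '1' else '0',
   if n / 8 % 2 = 1 then '1' else '0', if n / 4 % 2 = 1 then '1' else '0',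
   if n / 2 % 2 = 1 then '1' else '0', if n % 2 = 1 then '1' else '0']

lemma pyBinAux_fuel : ∀ f f' n : Nat, n ≤ f → n ≤ f' → pyBinAux f n = pyBinAux f' n := by
  intro f
  induction f with
  | zero => intro f' n hf _; interval_cases n; cases f' <;> rfl
  | succ f ih =>
    intro f' n hf hf'
    match n, f' with
    | 0, f' => cases f' <;> rfl
    | n + 1, f' + 1 =>
      show pyBinAux f ((n + 1) / 2) ++ _ = pyBinAux f' ((n + 1) / 2) ++ _
      rw [ih f' ((n + 1) / 2) (by omega) (by omega)]

lemma pyBinDigits_def (n : Nat) (h : n ≠ 0) :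
    pyBinDigits n = pyBinDigits (n / 2) ++ [if n % 2 = 1 then '1' else '0'] := by
  obtain ⟨m, rfl⟩ : ∃ m, n = m + 1 := ⟨n - 1, by omega⟩
  show pyBinAux m ((m + 1) / 2) ++ _ = pyBinAux ((m + 1) / 2) ((m + 1) / 2) ++ _
  rw [pyBinAux_fuel m ((m + 1) / 2) ((m + 1) / 2) (by omega) (le_refl _)]

lemma byteOf_mod (n : Nat) : byteOf n = byteOf (n % 256) := by
  unfold byteOf
  have h1 : n / 128 % 2 = n % 256 / 128 % 2 := by omega
  have h2 : n / 64 % 2 = n % 256 / 64 % 2 := by omega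
  have h3 : n / 32 % 2 = n % 256 / 32 % 2 := by omega
  have h4 : n / 16 % 2 = n % 256 / 16 % 2 := by omega
  have h5 : n / 8 % 2 = n % 256 / 8 % 2 := by omega
  have h6 : n / 4 % 2 = n % 256 / 4 % 2 := by omega
  have h7 : n / 2 % 2 = n % 256 / 2 % 2 := by omega
  have h8 : n % 2 = n % 256 % 2 := by omega
  rw [h1, h2, h3, h4, h5, h6, h7, h8]

lemma pyBinDigits_byte (n : Nat) (h : 256 ≤ n) :
    pyBinDigits n = pyBinDigits (n / 256) ++ byteOf n := by
  rw [pyBinDigits_def n (by omega),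
      pyBinDigits_def (n / 2) (by omega),
      pyBinDigits_def (n / 2 / 2) (by omega),
      pyBinDigits_def (n / 2 / 2 / 2) (by omega),
      pyBinDigits_def (n / 2 / 2 / 2 / 2) (by omega),
      pyBinDigits_def (n / 2 / 2 / 2 / 2 / 2) (by omega),
      pyBinDigits_def (n / 2 / 2 / 2 / 2 / 2 / 2) (by omega),
      pyBinDigits_def (n / 2 / 2 / 2 / 2 / 2 / 2 / 2) (by omega)]
  have e8 : n / 2 / 2 / 2 / 2 / 2 / 2 / 2 / 2 = n / 256 := by omega
  have e7 : n / 2 / 2 / 2 / 2 / 2 / 2 / 2 % 2 = n / 128 % 2 := by omega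
  have e6 : n / 2 / 2 / 2 / 2 / 2 / 2 % 2 = n / 64 % 2 := by omega
  have e5 : n / 2 / 2 / 2 / 2 / 2 % 2 = n / 32 % 2 := by omega
  have e4 : n / 2 / 2 / 2 / 2 % 2 = n / 16 % 2 := by omega
  have e3 : n / 2 / 2 / 2 % 2 = n / 8 % 2 := by omega
  have e2 : n / 2 / 2 % 2 = n / 4 % 2 := by omega
  rw [e8, e7, e6, e5, e4, e3, e2]
  simp [byteOf, List.append_assoc]

lemma pyBinDigits_ne_nil (n : Nat) (h : n ≠ 0) : pyBinDigits n ≠ [] := by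
  rw [pyBinDigits_def n h]; simp

lemma binaryOf_length_pos (n : Nat) : 1 ≤ (binaryOf n).length := by
  unfold binaryOf
  by_cases h : n = 0
  · simp [h]
  · simp only [h, if_false]
    have := pyBinDigits_ne_nil n h
    cases hc : pyBinDigits n with
    | nil => exact absurd hc this
    | cons a l => simp

lemma paddedOf_length (n : Nat) :
    (paddedOf n).length = (binaryOf n).length + (8 - (binaryOf n).length % 8) := by
  simp [paddedOf]; omega

lemma paddedOf_append (n : Nat) (h : 256 ≤ n) :
    paddedOf n = paddedOf (n / 256) ++ byteOf n := by
  have hq : n / 256 ≠ 0 := by omega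
  have hb : binaryOf n = pyBinDigits (n / 256) ++ byteOf n := by
    unfold binaryOf
    rw [if_neg (by omega : n ≠ 0)]
    exact pyBinDigits_byte n h
  have hbq : binaryOf (n / 256) = pyBinDigits (n / 256) := by
    unfold binaryOf; rw [if_neg hq]
  have hlen : (binaryOf n).length = (binaryOf (n / 256)).length + 8 := by
    rw [hb, hbq]; simp [byteOf]
  unfold paddedOf
  rw [hb, hbq]
  have hl : (pyBinDigits (n / 256) ++ byteOf n).length % 8 = (pyBinDigits (n / 256)).length % 8 := by
    simp [byteOf]
  rw [hl, List.append_assoc]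

-- generic chunking used only in the proofs
def chunksC (u : List Char) : List (List Char) :=
  (List.range (u.length / 8)).map
    (fun i => PySem.List.slice u (some ((i * 8 : Nat) : Int)) (some (((i + 1) * 8 : Nat) : Int)))

lemma chunkedOf_eq (n : Nat) : chunkedOf n = chunksC (paddedOf n) := rfl

lemma chunksC_append (s t : List Char) (m : Nat) (hs : s.length = 8 * m) (ht : t.length = 8) :
    chunksC (s ++ t) = chunksC s ++ [t] := by
  unfold chunksC
  have hlen : (s ++ t).length = 8 * (m + 1) := by simp [hs, ht]; ring
  rw [hlen, hs]
  have hm1 : 8 * (m + 1) / 8 = m + 1 := by omega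
  have hm : 8 * m / 8 = m := by omega
  rw [hm1, hm, List.range_succ, List.map_append]
  congr 1
  · apply List.map_congr_left
    intro i hi
    rw [List.mem_range] at hi
    rw [PySem.List.slice_natCast, PySem.List.slice_natCast]
    have h1 : (s ++ t).drop (i * 8) = s.drop (i * 8) ++ t := by
      rw [List.drop_append_of_le_length (by omega)]
    rw [h1]
    have h2 : (s.drop (i * 8)).length = 8 * m - i * 8 := by simp [hs]
    rw [List.take_append_of_le_length (by omega)]
  · simp only [List.map_cons, List.map_nil]
    rw [PySem.List.slice_natCast]
    have h1 : (s ++ t).drop (m * 8) = t := by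
      have : m * 8 = s.length := by omega
      rw [this, List.drop_left]
    rw [h1]
    have : (m + 1) * 8 - m * 8 = 8 := by omega
    rw [this, ← ht, List.take_length]

lemma parse2_shift (y : List Char) : ∀ a : Nat,
    y.foldl (fun a c => 2 * a + (if c = '1' then 1 else 0)) a
      = a * 2 ^ y.length + y.foldl (fun a c => 2 * a + (if c = '1' then 1 else 0)) 0 := by
  induction y with
  | nil => intro a; simp
  | cons c y ih =>
    intro a
    simp only [List.foldl_cons, List.length_cons]
    rw [ih (2 * a + (if c = '1' then 1 else 0)), ih (2 * 0 + (if c = '1' then 1 else 0))]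
    ring

lemma parse2_append (x y : List Char) :
    parse2 (x ++ y) = parse2 x * 2 ^ y.length + parse2 y := by
  unfold parse2
  rw [List.foldl_append]
  exact parse2_shift y _

set_option maxRecDepth 40000 in
lemma parse2_byteOf_reverse (n : Nat) :
    parse2 (byteOf n).reverse = revByte 8 (n % 256) 0 := by
  rw [byteOf_mod]
  have h : ∀ r, r < 256 → parse2 (byteOf r).reverse = revByte 8 r 0 := by decide
  exact h (n % 256) (Nat.mod_lt _ (by norm_num))

lemma paddedOf_mult (n : Nat) : ∃ m, (paddedOf n).length = 8 * m := by
  have h := paddedOf_length n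
  have h1 := binaryOf_length_pos n
  exact ⟨(paddedOf n).length / 8, by omega⟩

lemma Anat_step (n : Nat) (h : 256 ≤ n) :
    parse2 (reversedOf n) = parse2 (reversedOf (n / 256)) * 256 + revByte 8 (n % 256) 0 := by
  obtain ⟨m, hm⟩ := paddedOf_mult (n / 256)
  have hb : (byteOf n).length = 8 := by simp [byteOf]
  unfold reversedOf
  rw [chunkedOf_eq, chunkedOf_eq, paddedOf_append n h, chunksC_append _ _ m hm hb]
  rw [List.map_append, List.flatten_append]
  simp only [List.map_cons, List.map_nil, List.flatten_cons, List.flatten_nil, List.append_nil]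
  rw [parse2_append]
  rw [List.length_reverse, hb, parse2_byteOf_reverse]
  norm_num

set_option maxRecDepth 100000 in
lemma Anat_base : ∀ n, n < 256 → parse2 (reversedOf n) = gSpec n := by decide

lemma Anat_eq_gSpec (n : Nat) : parse2 (reversedOf n) = gSpec n := by
  induction n using Nat.strong_induction_on with
  | _ n ih =>
    by_cases h : n < 256
    · exact Anat_base n h
    · have h' : 256 ≤ n := by omega
      rw [Anat_step n h', ih (n / 256) (Nat.div_lt_self (by omega) (by norm_num))]
      rw [gSpec_def n (by omega)]
      ring

-- ===== VERDICT (by name: the statement is the Claim_ definition above) =====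
theorem rfid_to_em_spec : Claim_equal_rfid_to_em := by
  intro code _ _
  unfold Spec_rfid_to_em rfid_to_em rfid_to_em_alt
  rw [Anat_eq_gSpec, alt_eq_gSpec]
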